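-- pv_equiv track=rewrite | github.com/DKU-STUDY/Algorithm | programmers/난이도별/level02.더 맵게/HyeonJeong.py | solution
-- ===== SOURCE A (Python) =====
-- def solution(scoville, K):
--     answer = 0
--     s = sorted(scoville)
--     while 1:
--         if s[0] >= K:
--             return answer
--         if len(s) < 2:
--             return -1
--         # s가 가장 작은 s[0]가 K보다 작고 하나일 경우는 실패
--         tmp = s.pop(0) + s.pop(0)*2
--         # 가장 작은 것과 두 번째로 작은 것이 반환된 후 제거됨.
--         answer += 1
--         cnt = 0 # tmp가 s의 모든 요소 보다 큰 경우는 마지막 요소가 될 수 있게 하기 위해서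
--         for i, c in enumerate(s):
--             if tmp < c:
--                 s.insert(i, tmp)
--                 cnt = 1
--                 break
--         if cnt == 0:
--             s.append(tmp)
-- ===== SOURCE B (Python) =====
-- def solution(scoville, K):
--     # Leftist min-heap (hand-written, no imports): pop two smallest, push the mix.
--     # O(n log n) instead of A's O(n^2) sorted-list pops/inserts.
--     def merge(a, b):
--         if a is None:
--             return b
--         if b is None:
--             return a
--         if b[0] < a[0]:
--             a, b = b, a
--         k, rk, l, r = a
--         m = merge(r, b)
--         mr = m[1] if m is not None else 0
--         lr = l[1] if l is not None else 0
--         if lr < mr: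
--             l, m = m, l
--             mr = lr
--         return (k, mr + 1, l, m)
--
--     heap = None
--     for x in scoville:
--         heap = merge((x, 1, None, None), heap)
--     answer = 0
--     while heap[0] < K:
--         k1, _, l, r = heap
--         heap = merge(l, r)
--         if heap is None:
--             return -1
--         k2, _, l, r = heap
--         heap = merge((k1 + 2 * k2, 1, None, None), merge(l, r))
--         answer += 1
--     return answer
-- ===== Notes on version B (the rewrite author's own statement) =====
-- stated objective: faster
-- what changed: A keeps a sorted list and per mix does two pop(0) (O(n) shifts) plus a linear insertion scan; B maintains a hand-written leftist min-heap (no imports in A, so no heapq), popping the two smallest and pushing the mix in O(log n) per step.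
-- outside the precondition, e.g. on solution([], 5): A raises IndexError, B raises TypeError
import Mathlib
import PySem

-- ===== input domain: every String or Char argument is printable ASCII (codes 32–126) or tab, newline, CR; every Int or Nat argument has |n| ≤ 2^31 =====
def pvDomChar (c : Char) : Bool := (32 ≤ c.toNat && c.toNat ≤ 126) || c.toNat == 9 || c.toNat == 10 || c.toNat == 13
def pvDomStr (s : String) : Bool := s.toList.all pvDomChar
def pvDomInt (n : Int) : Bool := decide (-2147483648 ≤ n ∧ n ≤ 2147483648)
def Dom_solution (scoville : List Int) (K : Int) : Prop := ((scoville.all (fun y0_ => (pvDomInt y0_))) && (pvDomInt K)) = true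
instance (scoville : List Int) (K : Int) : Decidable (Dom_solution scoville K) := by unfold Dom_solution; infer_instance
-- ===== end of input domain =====

-- B replaces A's sorted-list simulation (two pop(0) + a linear insertion scan per mix)
-- by a hand-written leftist min-heap: pop the two smallest, push the mix.
-- (The fuel parameters below only make the same recursions structurally total:
-- each loop shrinks its collection by one element per step, so the stated fuel is never exhausted.)

-- ===== PORT A =====

-- A's insertion scan: insert tmp before the first element strictly greater, else append.
def insertA (tmp : Int) : List Int → List Int
  | [] => [tmp]
  | c :: cs => if tmp < c then tmp :: c :: cs else c :: insertA tmp cs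

-- A's `while 1` loop over the sorted list s (len(s) < 2 ⟺ the tail is empty);
-- the [] case is Python's IndexError on s[0]: reachable only for scoville = [], excluded by Pre_.
def aLoopF : Nat → List Int → Int → Int → Int
  | 0, _, _, _ => 0
  | n + 1, s, K, ans =>
    match s with
    | [] => 0
    | x :: rest =>
      if K ≤ x then ans
      else match rest with
        | [] => -1
        | y :: rest2 => aLoopF n (insertA (x + y * 2) rest2) K (ans + 1)

def solution (scoville : List Int) (K : Int) : Int :=
  let s := PySem.List.sorted scoville (fun x => x) false
  aLoopF s.length s K 0

-- ===== PORT B =====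

inductive LHeap : Type
  | nil : LHeap
  | node : Int → Int → LHeap → LHeap → LHeap
deriving DecidableEq, Repr

def LHeap.size : LHeap → Nat
  | .nil => 0
  | .node _ _ l r => l.size + r.size + 1

def LHeap.rank : LHeap → Int
  | .nil => 0
  | .node _ rk _ _ => rk

-- Source B's final node construction in merge: swap children when rank l < rank m; rank = min + 1.
def mkNode (k : Int) (l m : LHeap) : LHeap :=
  if l.rank < m.rank then .node k (l.rank + 1) m l else .node k (m.rank + 1) l m

-- Source B's recursive merge (the recursion consumes the right spine, so a.size + b.size fuel suffices).
def mergeF : Nat → LHeap → LHeap → LHeap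
  | _, .nil, b => b
  | _, a, .nil => a
  | 0, _, _ => .nil
  | n + 1, .node k1 rk1 l1 r1, .node k2 rk2 l2 r2 =>
    if k2 < k1 then mkNode k2 l2 (mergeF n r2 (.node k1 rk1 l1 r1))
    else mkNode k1 l1 (mergeF n r1 (.node k2 rk2 l2 r2))

def merge (a b : LHeap) : LHeap := mergeF (a.size + b.size) a b

-- B's `while heap[0] < K` loop; the .nil case is Python's TypeError on heap[0]:
-- reachable only for scoville = [], excluded by Pre_.
def bLoopF : Nat → LHeap → Int → Int → Int
  | 0, _, _, _ => 0
  | n + 1, h, K, ans =>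
    match h with
    | .nil => 0
    | .node k1 _ l r =>
      if k1 < K then
        match merge l r with
        | .nil => -1
        | .node k2 _ l2 r2 =>
          bLoopF n (merge (.node (k1 + 2 * k2) 1 .nil .nil) (merge l2 r2)) K (ans + 1)
      else ans

def solution_alt (scoville : List Int) (K : Int) : Int :=
  let heap := scoville.foldl (fun h x => merge (.node x 1 .nil .nil) h) .nil
  bLoopF heap.size heap K 0

-- ===== PRECONDITION & SPEC =====
-- Pre_ excludes only the empty list, on which both Pythons raise (A: IndexError on s[0], B: TypeError on heap[0]).
def Pre_solution (scoville : List Int) (K : Int) : Prop := scoville ≠ []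
instance (scoville : List Int) (K : Int) : Decidable (Pre_solution scoville K) := by unfold Pre_solution; infer_instance
def pvWitness_solution : List Int × Int := ([2, 3, 1], 11)

def Spec_solution (scoville : List Int) (K : Int) (out : Int) : Prop := out = solution_alt scoville K
instance (scoville : List Int) (K : Int) (out : Int) : Decidable (Spec_solution scoville K out) := by unfold Spec_solution; infer_instance

-- ===== CLAIM (what is proved, stated in full; the proofs are below) =====
def Claim_equal_solution : Prop := ∀ (scoville : List Int) (K : Int), Dom_solution scoville K → Pre_solution scoville K → Spec_solution scoville K (solution scoville K)

-- ===== LEMMAS AND PROOFS =====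

theorem length_insertA (tmp : Int) (l : List Int) : (insertA tmp l).length = l.length + 1 := by
  induction l with
  | nil => simp [insertA]
  | cons c cs ih => simp only [insertA]; split <;> simp [ih]

def LHeap.toList : LHeap → List Int
  | .nil => []
  | .node k _ l r => k :: (l.toList ++ r.toList)

def IsHeap : LHeap → Prop
  | .nil => True
  | .node k _ l r => (∀ x ∈ l.toList, k ≤ x) ∧ (∀ x ∈ r.toList, k ≤ x) ∧ IsHeap l ∧ IsHeap r

theorem mergeF_nil_left (n : Nat) (b : LHeap) : mergeF n .nil b = b := by
  cases n <;> cases b <;> rfl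

theorem mergeF_nil_right (n : Nat) (a : LHeap) : mergeF n a .nil = a := by
  cases n <;> cases a <;> rfl

theorem mergeF_node_node (n : Nat) (k1 rk1 k2 rk2 : Int) (l1 r1 l2 r2 : LHeap) :
    mergeF (n + 1) (.node k1 rk1 l1 r1) (.node k2 rk2 l2 r2) =
      if k2 < k1 then mkNode k2 l2 (mergeF n r2 (.node k1 rk1 l1 r1))
      else mkNode k1 l1 (mergeF n r1 (.node k2 rk2 l2 r2)) := rfl

theorem size_mkNode (k : Int) (l m : LHeap) : (mkNode k l m).size = l.size + m.size + 1 := by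
  unfold mkNode; split <;> simp only [LHeap.size] <;> omega

theorem size_mergeF (n : Nat) : ∀ (a b : LHeap), a.size + b.size ≤ n →
    (mergeF n a b).size = a.size + b.size := by
  induction n with
  | zero =>
    intro a b hle
    cases a <;> cases b <;> simp_all [LHeap.size, mergeF_nil_right]
  | succ n ih =>
    intro a b hle
    cases a with
    | nil => simp [mergeF_nil_left, LHeap.size]
    | node k1 rk1 l1 r1 =>
      cases b with
      | nil => simp [mergeF_nil_right, LHeap.size]
      | node k2 rk2 l2 r2 =>
        simp only [LHeap.size] at hle
        rw [mergeF_node_node]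
        split
        · rw [size_mkNode, ih r2 (.node k1 rk1 l1 r1) (by simp [LHeap.size]; omega)]
          simp [LHeap.size]; omega
        · rw [size_mkNode, ih r1 (.node k2 rk2 l2 r2) (by simp [LHeap.size]; omega)]
          simp [LHeap.size]; omega

theorem size_merge (a b : LHeap) : (merge a b).size = a.size + b.size :=
  size_mergeF (a.size + b.size) a b (le_refl _)

theorem toList_mkNode (k : Int) (l m : LHeap) :
    (mkNode k l m).toList.Perm (k :: (l.toList ++ m.toList)) := by
  unfold mkNode; split
  · simp only [LHeap.toList]; exact (List.perm_append_comm).cons k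
  · simp only [LHeap.toList]; exact List.Perm.refl _

theorem toList_mergeF (n : Nat) : ∀ (a b : LHeap), a.size + b.size ≤ n →
    (mergeF n a b).toList.Perm (a.toList ++ b.toList) := by
  induction n with
  | zero =>
    intro a b hle
    cases a <;> cases b <;> simp_all [LHeap.size, LHeap.toList, mergeF_nil_right]
  | succ n ih =>
    intro a b hle
    cases a with
    | nil => simp [mergeF_nil_left, LHeap.toList]
    | node k1 rk1 l1 r1 =>
      cases b with
      | nil => simp [mergeF_nil_right, LHeap.toList]
      | node k2 rk2 l2 r2 =>
        simp only [LHeap.size] at hle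
        rw [mergeF_node_node]
        split
        · refine (toList_mkNode _ _ _).trans (Multiset.coe_eq_coe.mp ?_)
          have ih' := Multiset.coe_eq_coe.mpr (ih r2 (.node k1 rk1 l1 r1) (by simp [LHeap.size]; omega))
          simp only [LHeap.toList, ← Multiset.coe_add, ← Multiset.cons_coe] at *
          rw [ih']
          simp only [← Multiset.singleton_add]
          abel
        · refine (toList_mkNode _ _ _).trans (Multiset.coe_eq_coe.mp ?_)
          have ih' := Multiset.coe_eq_coe.mpr (ih r1 (.node k2 rk2 l2 r2) (by simp [LHeap.size]; omega))
          simp only [LHeap.toList, ← Multiset.coe_add, ← Multiset.cons_coe] at *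
          rw [ih']
          simp only [← Multiset.singleton_add]
          abel

theorem toList_merge (a b : LHeap) : (merge a b).toList.Perm (a.toList ++ b.toList) :=
  toList_mergeF (a.size + b.size) a b (le_refl _)

theorem isHeap_mkNode (k : Int) (l m : LHeap)
    (hl : ∀ x ∈ l.toList, k ≤ x) (hm : ∀ x ∈ m.toList, k ≤ x)
    (Hl : IsHeap l) (Hm : IsHeap m) : IsHeap (mkNode k l m) := by
  unfold mkNode; split <;> exact ⟨by assumption, by assumption, by assumption, by assumption⟩

theorem root_le (k rk : Int) (l r : LHeap) (H : IsHeap (.node k rk l r)) :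
    ∀ x ∈ (LHeap.node k rk l r).toList, k ≤ x := by
  obtain ⟨h1, h2, _, _⟩ := H
  intro x hx
  simp [LHeap.toList] at hx
  rcases hx with h | h | h
  · omega
  · exact h1 x h
  · exact h2 x h

theorem isHeap_mergeF (n : Nat) : ∀ (a b : LHeap), a.size + b.size ≤ n →
    IsHeap a → IsHeap b → IsHeap (mergeF n a b) := by
  induction n with
  | zero =>
    intro a b hle Ha Hb
    cases a <;> cases b <;> simp_all [LHeap.size, mergeF_nil_right]
  | succ n ih =>
    intro a b hle Ha Hb
    cases a with
    | nil => simpa [mergeF_nil_left] using Hb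
    | node k1 rk1 l1 r1 =>
      cases b with
      | nil => simpa [mergeF_nil_right] using Ha
      | node k2 rk2 l2 r2 =>
        simp only [LHeap.size] at hle
        rw [mergeF_node_node]
        split
        · obtain ⟨b1, b2, b3, b4⟩ := Hb
          refine isHeap_mkNode _ _ _ b1 ?_ b3 (ih r2 (.node k1 rk1 l1 r1) (by simp [LHeap.size]; omega) b4 Ha)
          intro x hx
          have hmem := (toList_mergeF n r2 (.node k1 rk1 l1 r1) (by simp [LHeap.size]; omega)).mem_iff.mp hx
          simp at hmem
          rcases hmem with h' | h'
          · exact b2 x h'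
          · have := root_le k1 rk1 l1 r1 Ha x h'
            rename_i hlt
            omega
        · obtain ⟨a1, a2, a3, a4⟩ := Ha
          refine isHeap_mkNode _ _ _ a1 ?_ a3 (ih r1 (.node k2 rk2 l2 r2) (by simp [LHeap.size]; omega) a4 Hb)
          intro x hx
          have hmem := (toList_mergeF n r1 (.node k2 rk2 l2 r2) (by simp [LHeap.size]; omega)).mem_iff.mp hx
          simp at hmem
          rcases hmem with h' | h'
          · exact a2 x h'
          · have := root_le k2 rk2 l2 r2 Hb x h'
            rename_i hnlt
            omega

theorem isHeap_merge (a b : LHeap) (Ha : IsHeap a) (Hb : IsHeap b) : IsHeap (merge a b) :=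
  isHeap_mergeF (a.size + b.size) a b (le_refl _) Ha Hb

theorem perm_insertA (t : Int) (l : List Int) : (insertA t l).Perm (t :: l) := by
  induction l with
  | nil => simp [insertA]
  | cons c cs ih =>
    simp only [insertA]; split
    · rfl
    · exact (ih.cons c).trans (List.Perm.swap t c cs)

theorem pairwise_insertA (t : Int) (l : List Int) (h : l.Pairwise (· ≤ ·)) :
    (insertA t l).Pairwise (· ≤ ·) := by
  induction l with
  | nil => simp [insertA]
  | cons c cs ih =>
    rw [List.pairwise_cons] at h
    simp only [insertA]; split
    · refine List.pairwise_cons.mpr ⟨?_, List.pairwise_cons.mpr ⟨h.1, h.2⟩⟩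
      intro x hx
      simp at hx
      rcases hx with rfl | hx
      · omega
      · have := h.1 x hx; omega
    · refine List.pairwise_cons.mpr ⟨?_, ih h.2⟩
      intro x hx
      have := (perm_insertA t cs).mem_iff.mp hx
      simp at this
      rcases this with rfl | hx'
      · omega
      · exact h.1 x hx'

theorem toList_eq_nil (h : LHeap) : h.toList = [] → h = .nil := by
  cases h <;> simp [LHeap.toList]

-- The bLoopF fuel is exactly the heap size, and each loop step shrinks the heap by one element.
theorem bLoopF_step (k1 rk : Int) (l r : LHeap) (K ans : Int) :
    bLoopF (LHeap.node k1 rk l r).size (.node k1 rk l r) K ans =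
      if k1 < K then
        match merge l r with
        | .nil => -1
        | .node k2 _ l2 r2 =>
          bLoopF (merge (.node (k1 + 2 * k2) 1 .nil .nil) (merge l2 r2)).size
            (merge (.node (k1 + 2 * k2) 1 .nil .nil) (merge l2 r2)) K (ans + 1)
      else ans := by
  show bLoopF (l.size + r.size + 1) _ _ _ = _
  rw [bLoopF]
  split
  · split
    · rfl
    · next k2 rk2 l2 r2 heq =>
      have h1 := size_merge l r
      rw [heq] at h1
      simp only [LHeap.size] at h1
      have h2 : (merge (.node (k1 + 2 * k2) 1 .nil .nil) (merge l2 r2)).size = l.size + r.size := by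
        rw [size_merge, size_merge]
        simp only [LHeap.size]
        omega
      rw [h2]
  · rfl

theorem aLoopF_cons (x : Int) (rest : List Int) (K ans : Int) :
    aLoopF (x :: rest).length (x :: rest) K ans =
      if K ≤ x then ans
      else match rest with
        | [] => -1
        | y :: rest2 => aLoopF rest.length (insertA (x + y * 2) rest2) K (ans + 1) := rfl

-- The central simulation: A's sorted-list loop equals B's heap loop whenever the heap's
-- contents are a permutation of the sorted list.
theorem loop_sim (n : Nat) : ∀ (s : List Int) (h : LHeap) (K ans : Int),
    s.length = n → s.Pairwise (· ≤ ·) → IsHeap h → h.toList.Perm s →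
    aLoopF s.length s K ans = bLoopF h.size h K ans := by
  induction n using Nat.strong_induction_on with
  | _ n IH =>
  intro s h K ans hn hs Hh hperm
  match s, hn with
  | [], hn =>
    have hnil := toList_eq_nil h (List.Perm.eq_nil hperm)
    subst hnil
    simp [aLoopF, bLoopF, LHeap.size]
  | x :: rest, hn =>
    match h with
    | .nil => exact absurd (List.Perm.eq_nil hperm.symm) (by simp)
    | .node k1 rk1 l r =>
      -- the heap root equals the head of the sorted list
      have hk1x : k1 = x := by
        have h1 : k1 ≤ x := by
          have : x ∈ (LHeap.node k1 rk1 l r).toList := hperm.symm.mem_iff.mp (by simp)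
          exact root_le k1 rk1 l r Hh x this
        have h2 : x ≤ k1 := by
          have : k1 ∈ x :: rest := hperm.mem_iff.mp (by simp [LHeap.toList])
          simp at this
          rcases this with rfl | hm
          · omega
          · exact (List.pairwise_cons.mp hs).1 k1 hm
        omega
      subst hk1x
      rw [bLoopF_step, aLoopF_cons]
      by_cases hK : K ≤ k1
      · rw [if_pos hK, if_neg (by omega)]
      · rw [if_neg hK, if_pos (by omega)]
        have hrestperm : (merge l r).toList.Perm rest := by
          refine (toList_merge l r).trans ?_
          have hp : (k1 :: (l.toList ++ r.toList)).Perm (k1 :: rest) := by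
            simpa [LHeap.toList] using hperm
          exact hp.cons_inv
        obtain ⟨h1, h2, Hl, Hr⟩ := Hh
        have Hm : IsHeap (merge l r) := isHeap_merge l r Hl Hr
        cases rest with
        | nil =>
          dsimp only
          split
          · rfl
          · next k2 rk2 l2 r2 heq =>
            rw [heq] at hrestperm
            have := hrestperm.eq_nil
            simp [LHeap.toList] at this
        | cons y rest2 =>
          dsimp only
          split
          · next heq =>
            rw [heq] at hrestperm
            have := hrestperm.symm.eq_nil
            simp at this
          · next k2 rk2 l2 r2 heq =>
            rw [heq] at hrestperm Hm
            have hs2 := (List.pairwise_cons.mp hs).2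
            have hk2y : k2 = y := by
              have h1' : k2 ≤ y := by
                have hy : y ∈ (LHeap.node k2 rk2 l2 r2).toList := hrestperm.symm.mem_iff.mp (by simp)
                exact root_le k2 rk2 l2 r2 Hm y hy
              have h2' : y ≤ k2 := by
                have hk : k2 ∈ y :: rest2 := hrestperm.mem_iff.mp (by simp [LHeap.toList])
                simp at hk
                rcases hk with rfl | hmem
                · omega
                · exact (List.pairwise_cons.mp hs2).1 k2 hmem
              omega
            subst hk2y
            have htmp : k1 + k2 * 2 = k1 + 2 * k2 := by ring
            rw [htmp]
            obtain ⟨g1, g2, Gl, Gr⟩ := Hm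
            have hrest2perm : (merge l2 r2).toList.Perm rest2 := by
              refine (toList_merge l2 r2).trans ?_
              have hp : (k2 :: (l2.toList ++ r2.toList)).Perm (k2 :: rest2) := by
                simpa [LHeap.toList] using hrestperm
              exact hp.cons_inv
            have hlen : (insertA (k1 + 2 * k2) rest2).length = rest2.length + 1 := length_insertA _ _
            rw [show (k2 :: rest2).length = (insertA (k1 + 2 * k2) rest2).length by simp [hlen]]
            refine IH (rest2.length + 1) (by simp only [List.length_cons] at hn; omega) _ _ K (ans + 1) hlen ?_ ?_ ?_
            · exact pairwise_insertA _ _ (List.pairwise_cons.mp hs2).2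
            · refine isHeap_merge _ _ ?_ (isHeap_merge l2 r2 Gl Gr)
              exact ⟨by simp [LHeap.toList], by simp [LHeap.toList], trivial, trivial⟩
            · refine (toList_merge _ _).trans ?_
              refine List.Perm.trans ?_ (perm_insertA _ _).symm
              simpa [LHeap.toList] using hrest2perm.cons (k1 + 2 * k2)

theorem fold_toList (xs : List Int) : ∀ (h : LHeap),
    IsHeap h →
    IsHeap (xs.foldl (fun h x => merge (.node x 1 .nil .nil) h) h) ∧
    (xs.foldl (fun h x => merge (.node x 1 .nil .nil) h) h).toList.Perm (xs ++ h.toList) := by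
  induction xs with
  | nil => intro h Hh; simpa using Hh
  | cons x xs ih =>
    intro h Hh
    have Hs : IsHeap (LHeap.node x 1 .nil .nil) := ⟨by simp [LHeap.toList], by simp [LHeap.toList], trivial, trivial⟩
    have Hm := isHeap_merge _ _ Hs Hh
    obtain ⟨H1, H2⟩ := ih (merge (.node x 1 .nil .nil) h) Hm
    refine ⟨by simpa using H1, ?_⟩
    simp only [List.foldl_cons]
    refine H2.trans (Multiset.coe_eq_coe.mp ?_)
    have hstep : (merge (LHeap.node x 1 .nil .nil) h).toList.Perm (x :: h.toList) := by
      simpa [LHeap.toList] using toList_merge (.node x 1 .nil .nil) h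
    have hstep' := Multiset.coe_eq_coe.mpr hstep
    simp only [← Multiset.coe_add, ← Multiset.cons_coe] at *
    rw [hstep']
    simp only [← Multiset.singleton_add]
    abel

-- ===== VERDICT (by name: the statement is the Claim_ definition above) =====
theorem solution_spec : Claim_equal_solution := by
  intro scoville K _ _
  unfold Spec_solution solution solution_alt
  obtain ⟨H1, H2⟩ := fold_toList scoville .nil trivial
  refine loop_sim (PySem.List.sorted scoville (fun x => x) false).length _ _ K 0 rfl ?_ H1 ?_
  · simpa using PySem.List.sorted_pairwise scoville (fun x => x)
  · have H3 : (scoville.foldl (fun h x => merge (.node x 1 .nil .nil) h) .nil).toList.Perm scoville := by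
      simpa [LHeap.toList] using H2
    exact H3.trans (PySem.List.sorted_perm scoville (fun x => x) false).symm
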